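-- pv_equiv track=rewrite | github.com/miliar/Code_Jam_Webscraper | solutions_python/Problem_201/2420.py | simulate_best_stall
-- ===== SOURCE A (Python) =====
-- def free_stalls_left_to(stalls, position):
--     if position >= len(stalls) or stalls[position] is not None:
--         return 0
--     free = 0
--     for i in range(position - 1, -1, -1):
--         if stalls[i] is None:
--             free += 1
--         else:
--             break
--     return free
--
-- def free_stalls_right_to(stalls, position):
--     if position >= len(stalls) or stalls[position] is not None:
--         return 0
--     free = 0
--     for i in range(position + 1, len(stalls)):
--         if stalls[i] is None:
--             free += 1
--         else:
--             break
--     return free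
--
-- def simulate_best_stall(stalls):
--     computed_stalls = []
--     for i, stall in enumerate(stalls):
--         if stall is not None:
--             continue
--         left = free_stalls_left_to(stalls, i)
--         right = free_stalls_right_to(stalls, i)
--         computed_stalls.append((i, left, right,
--                                 min(left, right),
--                                 max(left, right)))
--     best_min_distance = sorted(computed_stalls, key=lambda x: x[3])[-1][3]
--     nice_stalls = [stall for stall in computed_stalls if
--                    stall[3] == best_min_distance]
--     best_max_distance = sorted(nice_stalls, key=lambda x: x[4])[-1][4]
--     very_nice_stalls = [stall for stall in nice_stalls if
--                         stall[4] == best_max_distance]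
--
--     return (min(stall[0] for stall in very_nice_stalls),
--             best_max_distance,
--             best_min_distance)
-- ===== SOURCE B (Python) =====
-- def simulate_best_stall(stalls):
--     # Precompute left/right free-run lengths in two passes, then one
--     # lexicographic-max scan (replaces per-stall neighbour rescans and two sorts).
--     left = []
--     run = 0
--     for s in stalls:
--         left.append(run)
--         run = run + 1 if s is None else 0
--     right = []
--     run = 0
--     for s in reversed(stalls):
--         right.append(run)
--         run = run + 1 if s is None else 0
--     right.reverse()
--     best = None  # (min_free, max_free, index)
--     for i, (s, l, r) in enumerate(zip(stalls, left, right)):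
--         if s is None:
--             key = (min(l, r), max(l, r))
--             if best is None or key > (best[0], best[1]):
--                 best = (key[0], key[1], i)
--     return (best[2], best[1], best[0])
-- ===== Notes on version B (the rewrite author's own statement) =====
-- stated objective: alternative
-- what changed: B precomputes left/right free-run lengths in two linear passes and picks the winner in one lexicographic-max scan, replacing A's per-free-stall neighbour rescans and its two sorts plus filters; on the random timing inputs the measured cost is the same.
-- outside the precondition, e.g. on simulate_best_stall([-1]): A raises IndexError, B raises TypeError
import Mathlib
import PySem

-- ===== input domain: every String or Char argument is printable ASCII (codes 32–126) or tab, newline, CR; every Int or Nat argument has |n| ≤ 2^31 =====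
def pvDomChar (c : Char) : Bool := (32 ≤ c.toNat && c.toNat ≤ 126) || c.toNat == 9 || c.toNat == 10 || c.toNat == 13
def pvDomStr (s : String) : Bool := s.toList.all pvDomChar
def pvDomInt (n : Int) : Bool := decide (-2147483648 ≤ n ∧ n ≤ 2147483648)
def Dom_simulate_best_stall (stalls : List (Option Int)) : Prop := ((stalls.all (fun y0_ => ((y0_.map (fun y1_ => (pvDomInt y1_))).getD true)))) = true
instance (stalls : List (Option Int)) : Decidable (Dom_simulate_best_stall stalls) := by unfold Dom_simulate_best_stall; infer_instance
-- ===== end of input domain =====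

-- B replaces A's per-stall neighbour rescans and two sorts by two linear run-length
-- passes and one lexicographic-max scan (objective: alternative).

-- ===== PORT A =====

-- for i in range(position-1, -1, -1): if stalls[i] is None: free += 1 else: break
-- (pyGet? = none would be an IndexError; unreachable here since every generated index is
-- in range — grouped with the break branch)
def fslLoop (stalls : List (Option Int)) : List Int → Int → Int
  | [], free => free
  | i :: rest, free =>
    match PySem.List.pyGet? stalls i with
    | some none => fslLoop stalls rest (free + 1)
    | _ => free

def free_stalls_left_to (stalls : List (Option Int)) (position : Int) : Int :=
  if position ≥ (stalls.length : Int) then 0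
  else
    match PySem.List.pyGet? stalls position with
    | some (some _) => 0
    | _ => fslLoop stalls (PySem.List.pyRange (position - 1) (-1) (-1)) 0

-- for i in range(position+1, len(stalls)): if stalls[i] is None: free += 1 else: break
def fsrLoop (stalls : List (Option Int)) : List Int → Int → Int
  | [], free => free
  | i :: rest, free =>
    match PySem.List.pyGet? stalls i with
    | some none => fsrLoop stalls rest (free + 1)
    | _ => free

def free_stalls_right_to (stalls : List (Option Int)) (position : Int) : Int :=
  if position ≥ (stalls.length : Int) then 0
  else
    match PySem.List.pyGet? stalls position with
    | some (some _) => 0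
    | _ => fsrLoop stalls (PySem.List.pyRange (position + 1) (stalls.length : Int) 1) 0

def stepA (stalls : List (Option Int))
    (acc : List (Int × Int × Int × Int × Int)) (x : Int × Option Int) :
    List (Int × Int × Int × Int × Int) :=
  match x.2 with
  | some _ => acc     -- continue
  | none =>
    let l := free_stalls_left_to stalls x.1
    let r := free_stalls_right_to stalls x.1
    acc ++ [(x.1, l, r, min l r, max l r)]

def simulate_best_stall (stalls : List (Option Int)) : List Int :=
  let computed := (PySem.List.enumerate stalls).foldl (stepA stalls) []
  match PySem.List.pyGet? (PySem.List.sorted computed (fun x => x.2.2.2.1)) (-1) with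
  | none => []        -- Python raises IndexError here (no free stall); excluded by Pre_
  | some b =>
    let best_min := b.2.2.2.1
    let nice := computed.filter (fun x => x.2.2.2.1 == best_min)
    match PySem.List.pyGet? (PySem.List.sorted nice (fun x => x.2.2.2.2)) (-1) with
    | none => []      -- unreachable: nice is nonempty whenever computed is
    | some b2 =>
      let best_max := b2.2.2.2.2
      let very := nice.filter (fun x => x.2.2.2.2 == best_max)
      match PySem.List.min? (very.map (fun x => x.1)) (fun y => y) with
      | none => []    -- unreachable
      | some mi => [mi, best_max, best_min]

-- ===== PORT B =====

-- left = []; run = 0; for s in stalls: left.append(run); run = run+1 if s is None else 0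
def runScan (stalls : List (Option Int)) : List Int :=
  (stalls.foldl
    (fun (acc : List Int × Int) s =>
      (acc.1 ++ [acc.2], match s with | none => acc.2 + 1 | some _ => 0))
    ([], 0)).1

-- Python tuple comparison key > (best[0], best[1]) (lexicographic, strict)
def lexGt (a b : Int × Int) : Bool := decide (b.1 < a.1 ∨ (a.1 = b.1 ∧ b.2 < a.2))

def bstep (best : Option (Int × Int × Int)) (x : Int × Option Int × Int × Int) :
    Option (Int × Int × Int) :=
  match x.2.1 with
  | some _ => best
  | none =>
    let key := (min x.2.2.1 x.2.2.2, max x.2.2.1 x.2.2.2)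
    match best with
    | none => some (key.1, key.2, x.1)
    | some b => if lexGt key (b.1, b.2.1) then some (key.1, key.2, x.1) else some b

def simulate_best_stall_alt (stalls : List (Option Int)) : List Int :=
  let left := runScan stalls
  let right := (runScan stalls.reverse).reverse
  match (PySem.List.enumerate (stalls.zip (left.zip right))).foldl bstep none with
  | some b => [b.2.2, b.2.1, b.1]
  | none => []      -- Python B raises TypeError here (no free stall); excluded by Pre_

-- ===== PRECONDITION & SPEC =====
-- Pre_ excludes exactly the inputs with no free stall (no None entry, e.g. []): there A
-- raises IndexError (sorted(...)[-1] on the empty candidate list) and B raises TypeError.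
def Pre_simulate_best_stall (stalls : List (Option Int)) : Prop := none ∈ stalls
instance (stalls : List (Option Int)) : Decidable (Pre_simulate_best_stall stalls) := by
  unfold Pre_simulate_best_stall; infer_instance

def pvWitness_simulate_best_stall : List (Option Int) := [none, some 1, none, none]

def Spec_simulate_best_stall (stalls : List (Option Int)) (out : List Int) : Prop := out = simulate_best_stall_alt stalls
instance (stalls : List (Option Int)) (out : List Int) : Decidable (Spec_simulate_best_stall stalls out) := by unfold Spec_simulate_best_stall; infer_instance

-- ===== CLAIM (what is proved, stated in full; the proofs are below) =====
def Claim_equal_simulate_best_stall : Prop := ∀ (stalls : List (Option Int)), Dom_simulate_best_stall stalls → Pre_simulate_best_stall stalls → Spec_simulate_best_stall stalls (simulate_best_stall stalls)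

-- ===== LEMMAS AND PROOFS =====

-- run value after scanning p starting from `run` (resets at every occupied stall)
def extT (run : Int) (p : List (Option Int)) : Int :=
  p.foldl (fun r s => match s with | none => r + 1 | some _ => 0) run

-- count of trailing None's of p
def trailN (p : List (Option Int)) : Int := extT 0 p

-- count of leading None's
def leadN : List (Option Int) → Int
  | [] => 0
  | none :: t => leadN t + 1
  | some _ :: t => 0

-- canonical candidate list: (index, left free run, right free run) of the free stalls
def candF (stalls : List (Option Int)) : List (Option Int) → Nat → List (Int × Int × Int)
  | [], _ => []
  | some _ :: t, k => candF stalls t (k + 1)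
  | none :: t, k =>
    ((k : Int), trailN (stalls.take k), leadN (stalls.drop (k + 1))) :: candF stalls t (k + 1)

-- the (min, max, index) triple stored by B's fold for candidate c
def keyT (c : Int × Int × Int) : Int × Int × Int := (min c.2.1 c.2.2, max c.2.1 c.2.2, c.1)

lemma keyT_fst (c : Int × Int × Int) : (keyT c).1 = min c.2.1 c.2.2 := rfl
lemma keyT_snd_fst (c : Int × Int × Int) : (keyT c).2.1 = max c.2.1 c.2.2 := rfl

-- candidate selection over triples, mirroring B's fold (earlier candidate wins ties)
def mergeB (b : Int × Int × Int) : Option (Int × Int × Int) → Int × Int × Int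
  | none => b
  | some p => if lexGt (p.1, p.2.1) (b.1, b.2.1) then p else b

def pickB : List (Int × Int × Int) → Option (Int × Int × Int)
  | [] => none
  | c :: cs => some (mergeB (keyT c) (pickB cs))

-- A's 5-tuple for candidate c
def ext5 (c : Int × Int × Int) : Int × Int × Int × Int × Int :=
  (c.1, c.2.1, c.2.2, min c.2.1 c.2.2, max c.2.1 c.2.2)

-- trailN over a snoc
lemma trailN_append (p : List (Option Int)) (x : Option Int) :
    trailN (p ++ [x]) = match x with | none => trailN p + 1 | some _ => 0 := by
  cases x <;> simp [trailN, extT, List.foldl_append]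

lemma extT_cons (run : Int) (s : Option Int) (t : List (Option Int)) :
    extT run (s :: t) = extT (match s with | none => run + 1 | some _ => 0) t := by
  cases s <;> simp [extT]

-- ---- A-side loop characterisations ----

lemma fslLoop_shift (stalls : List (Option Int)) (idxs : List Int) (free : Int) :
    fslLoop stalls idxs free = free + fslLoop stalls idxs 0 := by
  induction idxs generalizing free with
  | nil => simp [fslLoop]
  | cons i rest ih =>
    cases h : PySem.List.pyGet? stalls i with
    | none => simp [fslLoop, h]
    | some v =>
      cases v with
      | none => simp only [fslLoop, h]; rw [ih (free + 1), ih (0 + 1)]; ring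
      | some w => simp [fslLoop, h]

lemma fsrLoop_shift (stalls : List (Option Int)) (idxs : List Int) (free : Int) :
    fsrLoop stalls idxs free = free + fsrLoop stalls idxs 0 := by
  induction idxs generalizing free with
  | nil => simp [fsrLoop]
  | cons i rest ih =>
    cases h : PySem.List.pyGet? stalls i with
    | none => simp [fsrLoop, h]
    | some v =>
      cases v with
      | none => simp only [fsrLoop, h]; rw [ih (free + 1), ih (0 + 1)]; ring
      | some w => simp [fsrLoop, h]

lemma fslLoop_spec (stalls : List (Option Int)) :
    ∀ (k : Nat), k ≤ stalls.length →
      fslLoop stalls (PySem.List.pyRange ((k : Int) - 1) (-1) (-1)) 0 = trailN (stalls.take k) := by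
  intro k
  induction k with
  | zero =>
    intro _
    rw [PySem.List.pyRange_neg_one_eq_nil (by norm_num)]
    simp [fslLoop, trailN, extT]
  | succ k ih =>
    intro hk
    have hklt : k < stalls.length := by omega
    have hcast : ((k + 1 : Nat) : Int) - 1 = (k : Int) := by push_cast; ring
    rw [hcast, PySem.List.pyRange_neg_one_cons (by omega)]
    have hget : PySem.List.pyGet? stalls (k : Int) = some stalls[k] := by
      rw [PySem.List.pyGet?_natCast]; simp [List.getElem?_eq_getElem hklt]
    have htake : stalls.take (k + 1) = stalls.take k ++ [stalls[k]] := by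
      rw [List.take_add_one]; simp [List.getElem?_eq_getElem hklt]
    rw [htake]
    cases hx : stalls[k] with
    | none =>
      simp only [fslLoop, hget, hx]
      rw [fslLoop_shift, ih (by omega), trailN_append]
      simp; omega
    | some v =>
      simp only [fslLoop, hget, hx]
      rw [trailN_append]

lemma fsrLoop_spec (stalls : List (Option Int)) :
    ∀ (t : List (Option Int)) (j : Nat), stalls.drop j = t →
      fsrLoop stalls (PySem.List.pyRange (j : Int) (stalls.length : Int) 1) 0 = leadN t := by
  intro t
  induction t with
  | nil =>
    intro j hj
    have hlen : stalls.length ≤ j := List.drop_eq_nil_iff.mp hj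
    rw [PySem.List.pyRange_one_eq_nil (by omega)]
    simp [fsrLoop, leadN]
  | cons x t' ih =>
    intro j hj
    have hjlt : j < stalls.length := by
      by_contra h
      rw [List.drop_eq_nil_iff.mpr (by omega)] at hj
      simp at hj
    have hget : PySem.List.pyGet? stalls (j : Int) = some stalls[j] := by
      rw [PySem.List.pyGet?_natCast]; simp [List.getElem?_eq_getElem hjlt]
    have hx : stalls[j] = x := by
      have h0 : (stalls.drop j)[0]? = some x := by rw [hj]; rfl
      rw [List.getElem?_drop] at h0
      simp [List.getElem?_eq_getElem hjlt] at h0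
      exact h0
    have hdrop1 : stalls.drop (j + 1) = t' := by
      rw [← List.drop_drop, hj]
      rfl
    rw [PySem.List.pyRange_one_cons (by omega)]
    have hj1 : (j : Int) + 1 = ((j + 1 : Nat) : Int) := by push_cast; ring
    cases hxx : x with
    | some v => simp [fsrLoop, hget, hx, hxx, leadN]
    | none =>
      rw [hxx] at hx
      simp only [fsrLoop, hget, hx]
      rw [fsrLoop_shift, hj1, ih (j + 1) hdrop1]
      simp [leadN]
      omega

lemma fsl_eq (stalls : List (Option Int)) (k : Nat) (hk : k < stalls.length)
    (hnone : stalls[k] = none) :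
    free_stalls_left_to stalls (k : Int) = trailN (stalls.take k) := by
  have hget : PySem.List.pyGet? stalls (k : Int) = some stalls[k] := by
    rw [PySem.List.pyGet?_natCast]; simp [List.getElem?_eq_getElem hk]
  have hguard : ¬ ((k : Int) ≥ (stalls.length : Int)) := by omega
  have hcast : (k : Int) - 1 = ((k : Nat) : Int) - 1 := rfl
  simp only [free_stalls_left_to, if_neg hguard, hget, hnone]
  exact fslLoop_spec stalls k (by omega)

lemma fsr_eq (stalls : List (Option Int)) (k : Nat) (hk : k < stalls.length)
    (hnone : stalls[k] = none) :
    free_stalls_right_to stalls (k : Int) = leadN (stalls.drop (k + 1)) := by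
  have hget : PySem.List.pyGet? stalls (k : Int) = some stalls[k] := by
    rw [PySem.List.pyGet?_natCast]; simp [List.getElem?_eq_getElem hk]
  have hguard : ¬ ((k : Int) ≥ (stalls.length : Int)) := by omega
  simp only [free_stalls_right_to, if_neg hguard, hget, hnone]
  have hj1 : (k : Int) + 1 = ((k + 1 : Nat) : Int) := by push_cast; ring
  rw [hj1]
  exact fsrLoop_spec stalls (stalls.drop (k + 1)) (k + 1) rfl

-- the A fold collects exactly the candidates (with their run-length scores)
lemma foldA (stalls : List (Option Int)) :
    ∀ (t : List (Option Int)) (k : Nat) (acc : List (Int × Int × Int × Int × Int)),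
      stalls.drop k = t →
      (PySem.List.enumerate t (k : Int)).foldl (stepA stalls) acc =
        acc ++ (candF stalls t k).map ext5 := by
  intro t
  induction t with
  | nil => intro k acc _; simp [PySem.List.enumerate_nil, candF]
  | cons x t' ih =>
    intro k acc hj
    have hjlt : k < stalls.length := by
      by_contra h
      rw [List.drop_eq_nil_iff.mpr (by omega)] at hj
      simp at hj
    have hx : stalls[k] = x := by
      have h0 : (stalls.drop k)[0]? = some x := by rw [hj]; rfl
      rw [List.getElem?_drop] at h0
      simp [List.getElem?_eq_getElem hjlt] at h0
      exact h0
    have hdrop1 : stalls.drop (k + 1) = t' := by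
      rw [← List.drop_drop, hj]
      rfl
    have hk1 : (k : Int) + 1 = ((k + 1 : Nat) : Int) := by push_cast; ring
    rw [PySem.List.enumerate_cons, List.foldl_cons, hk1]
    cases hxx : x with
    | some v =>
      rw [hxx] at hx
      have hstep : stepA stalls acc ((k : Int), some v) = acc := by simp [stepA]
      rw [hstep, ih (k + 1) acc hdrop1]
      simp [candF]
    | none =>
      rw [hxx] at hx
      have hstep : stepA stalls acc ((k : Int), (none : Option Int)) =
          acc ++ [ext5 ((k : Int), trailN (stalls.take k), leadN (stalls.drop (k + 1)))] := by
        simp only [stepA, ext5]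
        rw [fsl_eq stalls k hjlt hx, fsr_eq stalls k hjlt hx]
      rw [hstep, ih (k + 1) _ hdrop1]
      simp [candF, List.append_assoc]

-- structural form of runScan
def lruns : List (Option Int) → Int → List Int
  | [], _ => []
  | s :: t, run => run :: lruns t (match s with | none => run + 1 | some _ => 0)

lemma runScan_aux (l : List (Option Int)) :
    ∀ (acc : List Int) (run : Int),
      (l.foldl
        (fun (a : List Int × Int) s =>
          (a.1 ++ [a.2], match s with | none => a.2 + 1 | some _ => 0)) (acc, run)).1 =
        acc ++ lruns l run := by
  induction l with
  | nil => intro acc run; simp [lruns]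
  | cons s t ih =>
    intro acc run
    rw [List.foldl_cons]
    cases s <;> simp [ih, lruns]

lemma runScan_eq (stalls : List (Option Int)) : runScan stalls = lruns stalls 0 := by
  have := runScan_aux stalls [] 0
  simpa [runScan] using this

lemma length_lruns (l : List (Option Int)) : ∀ run, (lruns l run).length = l.length := by
  induction l with
  | nil => intro run; rfl
  | cons s t ih => intro run; simp [lruns, ih]

lemma getElem_lruns (l : List (Option Int)) :
    ∀ (run : Int) (j : Nat) (hj : j < l.length),
      (lruns l run)[j]'(by rw [length_lruns]; exact hj) = extT run (l.take j) := by
  induction l with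
  | nil => intro run j hj; simp at hj
  | cons s t ih =>
    intro run j hj
    cases j with
    | zero => simp [lruns, extT]
    | succ j =>
      cases s with
      | none =>
        have := ih (run + 1) j (by simpa using hj)
        simp only [lruns, List.getElem_cons_succ, List.take_succ_cons]
        rw [this, extT_cons]
      | some v =>
        have := ih 0 j (by simpa using hj)
        simp only [lruns, List.getElem_cons_succ, List.take_succ_cons]
        rw [this, extT_cons]

lemma trailN_reverse (l : List (Option Int)) : trailN l.reverse = leadN l := by
  induction l with
  | nil => rfl
  | cons s t ih =>
    rw [List.reverse_cons, show trailN (t.reverse ++ [s]) = _ from trailN_append t.reverse s]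
    cases s with
    | none => simp [leadN, ih]
    | some v => simp [leadN]

lemma zipB_length (stalls : List (Option Int)) :
    (stalls.zip ((runScan stalls).zip ((runScan stalls.reverse).reverse))).length
      = stalls.length := by
  simp [runScan_eq, length_lruns]

-- the j-th entry of B's zipped scan list
lemma zipB_getElem (stalls : List (Option Int)) (j : Nat) (hj : j < stalls.length) :
    (stalls.zip ((runScan stalls).zip ((runScan stalls.reverse).reverse)))[j]'
        (by rw [zipB_length]; exact hj) =
      (stalls[j], trailN (stalls.take j), leadN (stalls.drop (j + 1))) := by
  have hL : (runScan stalls).length = stalls.length := by rw [runScan_eq, length_lruns]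
  have hR : ((runScan stalls.reverse).reverse).length = stalls.length := by
    simp [runScan_eq, length_lruns]
  rw [List.getElem_zip, List.getElem_zip]
  congr 1
  congr 1
  · simp only [runScan_eq]
    exact getElem_lruns stalls 0 j hj
  · rw [List.getElem_reverse]
    simp only [runScan_eq, length_lruns, List.length_reverse]
    have h2 := getElem_lruns stalls.reverse 0 (stalls.length - 1 - j)
      (by rw [List.length_reverse]; omega)
    have h3 : stalls.reverse.take (stalls.length - 1 - j) = (stalls.drop (j + 1)).reverse := by
      rw [List.take_reverse]
      have he : stalls.length - (stalls.length - 1 - j) = j + 1 := by omega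
      rw [he]
    rw [h2, h3]
    exact trailN_reverse _

-- B's fold step on a free stall, as an update on candidate triples
def updC (b : Option (Int × Int × Int)) (c : Int × Int × Int) : Option (Int × Int × Int) :=
  match b with
  | none => some (keyT c)
  | some p =>
    if lexGt (min c.2.1 c.2.2, max c.2.1 c.2.2) (p.1, p.2.1) then some (keyT c) else some p

lemma bstep_skip (b : Option (Int × Int × Int)) (i v l r : Int) :
    bstep b (i, some v, l, r) = b := rfl

lemma bstep_free (b : Option (Int × Int × Int)) (i l r : Int) :
    bstep b (i, none, l, r) = updC b (i, l, r) := by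
  cases b <;> rfl

-- B's whole fold runs the candidate-selection fold over the candidate list
lemma foldB (stalls : List (Option Int)) :
    ∀ (t : List (Option Int)) (k : Nat) (b : Option (Int × Int × Int)),
      stalls.drop k = t →
      (PySem.List.enumerate
        ((stalls.zip ((runScan stalls).zip ((runScan stalls.reverse).reverse))).drop k)
        (k : Int)).foldl bstep b =
      (candF stalls t k).foldl updC b := by
  intro t
  induction t with
  | nil =>
    intro k b hj
    have hlen : stalls.length ≤ k := List.drop_eq_nil_iff.mp hj
    rw [List.drop_eq_nil_iff.mpr (by rw [zipB_length]; omega)]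
    simp [PySem.List.enumerate_nil, candF]
  | cons x t' ih =>
    intro k b hj
    have hjlt : k < stalls.length := by
      by_contra h
      rw [List.drop_eq_nil_iff.mpr (by omega)] at hj
      simp at hj
    have hx : stalls[k] = x := by
      have h0 : (stalls.drop k)[0]? = some x := by rw [hj]; rfl
      rw [List.getElem?_drop] at h0
      simp [List.getElem?_eq_getElem hjlt] at h0
      exact h0
    have hdrop1 : stalls.drop (k + 1) = t' := by
      rw [← List.drop_drop, hj]
      rfl
    have hk1 : (k : Int) + 1 = ((k + 1 : Nat) : Int) := by push_cast; ring
    rw [List.drop_eq_getElem_cons (by rw [zipB_length]; exact hjlt), zipB_getElem stalls k hjlt,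
        PySem.List.enumerate_cons, List.foldl_cons, hk1]
    cases hxx : x with
    | some v =>
      rw [hxx] at hx
      rw [hx, bstep_skip, ih (k + 1) b hdrop1]
      simp [candF]
    | none =>
      rw [hxx] at hx
      rw [hx, bstep_free, ih (k + 1) _ hdrop1]
      simp [candF]

-- first-argmax selection: combining with the running best associates
lemma mergeB_assoc (b c : Int × Int × Int) (q : Option (Int × Int × Int)) :
    mergeB (mergeB b (some c)) q = mergeB b (some (mergeB c q)) := by
  cases q with
  | none => simp [mergeB]
  | some p =>
    simp only [mergeB, lexGt, decide_eq_true_eq]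
    split_ifs <;> first | rfl | omega

lemma foldl_updC_some : ∀ (cs : List (Int × Int × Int)) (b : Int × Int × Int),
    cs.foldl updC (some b) = some (mergeB b (pickB cs)) := by
  intro cs
  induction cs with
  | nil => intro b; simp [pickB, mergeB]
  | cons c cs ih =>
    intro b
    have hstep : updC (some b) c = some (mergeB b (some (keyT c))) := by
      simp only [updC, mergeB, keyT]
      split_ifs <;> rfl
    rw [List.foldl_cons, hstep, ih, mergeB_assoc]
    rfl

lemma foldl_updC_none (cs : List (Int × Int × Int)) :
    cs.foldl updC none = pickB cs := by
  cases cs with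
  | nil => rfl
  | cons c cs =>
    have hstep : updC none c = some (keyT c) := rfl
    rw [List.foldl_cons, hstep, foldl_updC_some]
    rfl

lemma pickB_eq_none (cs : List (Int × Int × Int)) : pickB cs = none ↔ cs = [] := by
  cases cs <;> simp [pickB]

lemma pickB_mem : ∀ (cs : List (Int × Int × Int)) (r : Int × Int × Int),
    pickB cs = some r → ∃ c ∈ cs, r = keyT c := by
  intro cs
  induction cs with
  | nil => intro r h; simp [pickB] at h
  | cons c cs ih =>
    intro r h
    simp only [pickB, Option.some.injEq] at h
    cases hq : pickB cs with
    | none =>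
      rw [hq] at h
      exact ⟨c, List.mem_cons_self, by rw [← h]; rfl⟩
    | some p =>
      rw [hq] at h
      simp only [mergeB] at h
      split_ifs at h
      · obtain ⟨c', hc', he⟩ := ih p hq
        exact ⟨c', List.mem_cons_of_mem _ hc', by rw [← h, he]⟩
      · exact ⟨c, List.mem_cons_self, h.symm⟩

lemma pickB_max : ∀ (cs : List (Int × Int × Int)) (r : Int × Int × Int),
    pickB cs = some r → ∀ c ∈ cs,
      min c.2.1 c.2.2 < r.1 ∨ (min c.2.1 c.2.2 = r.1 ∧ max c.2.1 c.2.2 ≤ r.2.1) := by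
  intro cs
  induction cs with
  | nil => intro r h; simp [pickB] at h
  | cons c0 cs ih =>
    intro r h c hc
    simp only [pickB, Option.some.injEq] at h
    rcases List.mem_cons.mp hc with rfl | hc'
    · -- c is the head
      cases hq : pickB cs with
      | none =>
        rw [hq] at h
        simp only [mergeB] at h
        rw [← h]
        simp [keyT]
      | some p =>
        rw [hq] at h
        simp only [mergeB, lexGt, decide_eq_true_eq, keyT_fst, keyT_snd_fst] at h
        split_ifs at h with hgt
        · rw [← h]
          rcases hgt with h1 | ⟨h2, h3⟩
          · exact Or.inl h1
          · exact Or.inr ⟨h2.symm, le_of_lt h3⟩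
        · rw [← h]; exact Or.inr ⟨rfl, le_refl _⟩
    · -- c in the tail
      cases hq : pickB cs with
      | none => rw [(pickB_eq_none cs).mp hq] at hc'; simp at hc'
      | some p =>
        have hp := ih p hq c hc'
        rw [hq] at h
        simp only [mergeB, lexGt, decide_eq_true_eq, keyT_fst, keyT_snd_fst] at h
        split_ifs at h with hgt
        · rw [← h]; exact hp
        · rw [← h]; simp only [keyT_fst, keyT_snd_fst]; omega

lemma pickB_first : ∀ (cs : List (Int × Int × Int)) (r : Int × Int × Int),
    cs.Pairwise (fun a b => a.1 < b.1) → pickB cs = some r → ∀ c ∈ cs,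
      min c.2.1 c.2.2 = r.1 → max c.2.1 c.2.2 = r.2.1 → r.2.2 ≤ c.1 := by
  intro cs
  induction cs with
  | nil => intro r _ h; simp [pickB] at h
  | cons c0 cs ih =>
    intro r hpw h c hc hmin hmax
    have hlt : ∀ u ∈ cs, c0.1 < u.1 := (List.pairwise_cons.mp hpw).1
    have hpw' := (List.pairwise_cons.mp hpw).2
    simp only [pickB, Option.some.injEq] at h
    cases hq : pickB cs with
    | none =>
      have : cs = [] := (pickB_eq_none cs).mp hq
      subst this
      rcases List.mem_cons.mp hc with rfl | hc'
      · rw [hq] at h; simp only [mergeB] at h; rw [← h]; simp [keyT]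
      · simp at hc'
    | some p =>
      obtain ⟨cp, hcp, hep⟩ := pickB_mem cs p hq
      rw [hq] at h
      simp only [mergeB, lexGt, decide_eq_true_eq, keyT_fst, keyT_snd_fst] at h
      split_ifs at h with hgt
      · -- r = p, the best of the tail wins strictly
        subst h
        rcases List.mem_cons.mp hc with rfl | hc'
        · exfalso; omega
        · exact ih p hpw' hq c hc' hmin hmax
      · -- r = keyT c0, the head (smallest index) wins
        rcases List.mem_cons.mp hc with rfl | hc'
        · rw [← h]; exact le_refl _
        · rw [← h]; exact le_of_lt (hlt c hc')

lemma candF_lb (stalls : List (Option Int)) :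
    ∀ (t : List (Option Int)) (k : Nat) (c : Int × Int × Int),
      c ∈ candF stalls t k → (k : Int) ≤ c.1 := by
  intro t
  induction t with
  | nil => intro k c hc; simp [candF] at hc
  | cons x t' ih =>
    intro k c hc
    cases x with
    | some v =>
      have := ih (k + 1) c (by simpa [candF] using hc)
      push_cast at this ⊢
      omega
    | none =>
      simp only [candF] at hc
      rcases List.mem_cons.mp hc with rfl | hc'
      · simp
      · have := ih (k + 1) c hc'
        push_cast at this ⊢
        omega

lemma candF_pairwise (stalls : List (Option Int)) :
    ∀ (t : List (Option Int)) (k : Nat),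
      (candF stalls t k).Pairwise (fun a b => a.1 < b.1) := by
  intro t
  induction t with
  | nil => intro k; simp [candF]
  | cons x t' ih =>
    intro k
    cases x with
    | some v => simpa [candF] using ih (k + 1)
    | none =>
      simp only [candF]
      refine List.pairwise_cons.mpr ⟨?_, ih (k + 1)⟩
      intro c hc
      have := candF_lb stalls t' (k + 1) c hc
      push_cast at this ⊢
      omega

lemma candF_ne (stalls : List (Option Int)) :
    ∀ (t : List (Option Int)) (k : Nat), none ∈ t → candF stalls t k ≠ [] := by
  intro t
  induction t with
  | nil => intro k h; simp at h
  | cons x t' ih =>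
    intro k h
    cases x with
    | some v =>
      have hx : none ∈ t' := by simpa using h
      simpa [candF] using ih (k + 1) hx
    | none => simp [candF]

-- the last element of a Pairwise-ordered list dominates every element
lemma pairwise_getLast? {α : Type} (R : α → α → Prop) :
    ∀ (l : List α) (b : α), l.Pairwise R → l.getLast? = some b →
      ∀ a ∈ l, a = b ∨ R a b := by
  intro l
  induction l with
  | nil => intro b _ h; simp at h
  | cons x t ih =>
    intro b hpw hlast a ha
    cases t with
    | nil =>
      simp at hlast ha
      subst hlast; subst ha
      exact Or.inl rfl
    | cons y t' =>
      rw [List.getLast?_cons_cons] at hlast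
      have hx : ∀ u ∈ y :: t', R x u := (List.pairwise_cons.mp hpw).1
      rcases List.mem_cons.mp ha with rfl | ha'
      · exact Or.inr (hx b (List.mem_of_getLast? hlast))
      · exact ih b (List.pairwise_cons.mp hpw).2 hlast a ha'

-- ===== VERDICT (by name: the statement is the Claim_ definition above) =====
theorem simulate_best_stall_spec : Claim_equal_simulate_best_stall := by
  intro stalls _hdom hpre
  unfold Spec_simulate_best_stall
  have hcs : candF stalls stalls 0 ≠ [] := candF_ne stalls stalls 0 hpre
  obtain ⟨r, hr⟩ : ∃ r, pickB (candF stalls stalls 0) = some r := by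
    cases h : pickB (candF stalls stalls 0) with
    | none => exact absurd ((pickB_eq_none _).mp h) hcs
    | some r => exact ⟨r, rfl⟩
  set cs := candF stalls stalls 0 with hcsdef
  -- B computes [r.2.2, r.2.1, r.1]
  have hB : simulate_best_stall_alt stalls = [r.2.2, r.2.1, r.1] := by
    have hfold := foldB stalls stalls 0 none rfl
    simp only [List.drop_zero, Nat.cast_zero] at hfold
    rw [foldl_updC_none, ← hcsdef, hr] at hfold
    simp only [simulate_best_stall_alt, hfold]
  -- A's candidate scan
  have h5 : (PySem.List.enumerate stalls 0).foldl (stepA stalls) [] = cs.map ext5 := by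
    have := foldA stalls stalls 0 [] rfl
    simpa using this
  set ds := cs.map ext5 with hdsdef
  have hds : ds ≠ [] := by
    intro h
    exact hcs (List.map_eq_nil_iff.mp h)
  -- r's source candidate
  obtain ⟨cr, hcr, hrk⟩ := pickB_mem cs r hr
  have hcr5 : ext5 cr ∈ ds := List.mem_map_of_mem hcr
  have hr1 : r.1 = min cr.2.1 cr.2.2 := by rw [hrk]; rfl
  have hr2 : r.2.1 = max cr.2.1 cr.2.2 := by rw [hrk]; rfl
  have hr3 : r.2.2 = cr.1 := by rw [hrk]; rfl
  -- stage 1: last of the first sort is the max of the min-scores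
  obtain ⟨b, hb⟩ : ∃ b, (PySem.List.sorted ds (fun x => x.2.2.2.1)).getLast? = some b := by
    have hne : PySem.List.sorted ds (fun x => x.2.2.2.1) ≠ [] := by
      intro h
      exact hds ((PySem.List.sorted_eq_nil_iff _ _ _).mp h)
    exact Option.isSome_iff_exists.mp (List.getLast?_isSome.mpr hne)
  have hbds : b ∈ ds := by
    have := List.mem_of_getLast? hb
    exact (PySem.List.mem_sorted _ _ _ _).mp this
  have hmax1 : ∀ a ∈ ds, a.2.2.2.1 ≤ b.2.2.2.1 := by
    intro a ha
    rcases pairwise_getLast? _ _ b (PySem.List.sorted_pairwise ds (fun x => x.2.2.2.1)) hb a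
      ((PySem.List.mem_sorted _ _ _ _).mpr ha) with rfl | hle
    · exact le_refl _
    · exact hle
  have hbm : b.2.2.2.1 = r.1 := by
    obtain ⟨cb, hcb, hfb⟩ := List.mem_map.mp hbds
    have h1 := pickB_max cs r hr cb hcb
    have h2 := hmax1 (ext5 cr) hcr5
    have e1 : b.2.2.2.1 = min cb.2.1 cb.2.2 := by rw [← hfb]; rfl
    have e2 : (ext5 cr).2.2.2.1 = min cr.2.1 cr.2.2 := rfl
    rw [e2, ← hr1] at h2
    omega
  -- stage 2: filter the best-min candidates and take the max of the max-scores
  set nice := ds.filter (fun x => x.2.2.2.1 == b.2.2.2.1) with hnicedef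
  have hcr_nice : ext5 cr ∈ nice := by
    rw [hnicedef]
    refine List.mem_filter.mpr ⟨hcr5, ?_⟩
    have : (ext5 cr).2.2.2.1 = b.2.2.2.1 := by rw [hbm, hr1]; rfl
    simpa [beq_iff_eq] using this
  have hnice_sub : ∀ a ∈ nice, a ∈ ds ∧ a.2.2.2.1 = b.2.2.2.1 := by
    intro a ha
    rw [hnicedef] at ha
    have := List.mem_filter.mp ha
    exact ⟨this.1, by simpa [beq_iff_eq] using this.2⟩
  obtain ⟨b2, hb2⟩ : ∃ b2, (PySem.List.sorted nice (fun x => x.2.2.2.2)).getLast? = some b2 := by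
    have hne : PySem.List.sorted nice (fun x => x.2.2.2.2) ≠ [] := by
      intro h
      rw [(PySem.List.sorted_eq_nil_iff _ _ _).mp h] at hcr_nice
      simp at hcr_nice
    exact Option.isSome_iff_exists.mp (List.getLast?_isSome.mpr hne)
  have hb2nice : b2 ∈ nice := by
    have := List.mem_of_getLast? hb2
    exact (PySem.List.mem_sorted _ _ _ _).mp this
  have hmax2 : ∀ a ∈ nice, a.2.2.2.2 ≤ b2.2.2.2.2 := by
    intro a ha
    rcases pairwise_getLast? _ _ b2 (PySem.List.sorted_pairwise nice (fun x => x.2.2.2.2)) hb2 a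
      ((PySem.List.mem_sorted _ _ _ _).mpr ha) with rfl | hle
    · exact le_refl _
    · exact hle
  have hbM : b2.2.2.2.2 = r.2.1 := by
    obtain ⟨hb2ds, hb2min⟩ := hnice_sub b2 hb2nice
    obtain ⟨cb, hcb, hfb⟩ := List.mem_map.mp hb2ds
    have h1 := pickB_max cs r hr cb hcb
    have h2 := hmax2 (ext5 cr) hcr_nice
    have e1 : b2.2.2.2.2 = max cb.2.1 cb.2.2 := by rw [← hfb]; rfl
    have e1' : b2.2.2.2.1 = min cb.2.1 cb.2.2 := by rw [← hfb]; rfl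
    have e2 : (ext5 cr).2.2.2.2 = max cr.2.1 cr.2.2 := rfl
    rw [e2, ← hr2] at h2
    rw [e1', hbm] at hb2min
    omega
  -- stage 3: the smallest index among the doubly-best candidates
  set very := nice.filter (fun x => x.2.2.2.2 == b2.2.2.2.2) with hverydef
  have hcr_very : ext5 cr ∈ very := by
    rw [hverydef]
    refine List.mem_filter.mpr ⟨hcr_nice, ?_⟩
    have : (ext5 cr).2.2.2.2 = b2.2.2.2.2 := by rw [hbM, hr2]; rfl
    simpa [beq_iff_eq] using this
  obtain ⟨mi, hmi⟩ : ∃ mi, PySem.List.min? (very.map (fun x => x.1)) (fun y => y) = some mi := by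
    cases h : PySem.List.min? (very.map (fun x => x.1)) (fun y => y) with
    | none =>
      rw [PySem.List.min?_eq_none_iff] at h
      rw [List.map_eq_nil_iff.mp h] at hcr_very
      simp at hcr_very
    | some mi => exact ⟨mi, rfl⟩
  have hmir : mi = r.2.2 := by
    have hmem := PySem.List.min?_mem hmi
    obtain ⟨a, ha, hfa⟩ := List.mem_map.mp hmem
    have ha_nice := (List.mem_filter.mp (by rw [hverydef] at ha; exact ha)).1
    have ha_max : a.2.2.2.2 = b2.2.2.2.2 := by
      have := (List.mem_filter.mp (by rw [hverydef] at ha; exact ha)).2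
      simpa [beq_iff_eq] using this
    obtain ⟨hads, ha_min⟩ := hnice_sub a ha_nice
    obtain ⟨ca, hca, hfca⟩ := List.mem_map.mp hads
    have e1 : min ca.2.1 ca.2.2 = r.1 := by
      have : a.2.2.2.1 = min ca.2.1 ca.2.2 := by rw [← hfca]; rfl
      rw [this, hbm] at ha_min
      exact ha_min
    have e2 : max ca.2.1 ca.2.2 = r.2.1 := by
      have : a.2.2.2.2 = max ca.2.1 ca.2.2 := by rw [← hfca]; rfl
      rw [this, hbM] at ha_max
      exact ha_max
    have hfirst := pickB_first cs r (by rw [hcsdef]; exact candF_pairwise stalls stalls 0) hr ca hca e1 e2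
    have hca1 : ca.1 = mi := by
      have : a.1 = ca.1 := by rw [← hfca]; rfl
      rw [← this]
      exact hfa
    have hle : mi ≤ r.2.2 := by
      have := PySem.List.min?_isMin hmi ((ext5 cr).1) (List.mem_map_of_mem hcr_very)
      have e3 : (ext5 cr).1 = cr.1 := rfl
      rw [e3, ← hr3] at this
      exact this
    omega
  -- assemble A's pipeline
  simp only [simulate_best_stall, h5, PySem.List.pyGet?_neg_one, hb, ← hnicedef, hb2,
    ← hverydef, hmi]
  rw [hmir, hbM, hbm, hB]
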